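-- pv_equiv track=rewrite | github.com/Pielak/automacao-juridica-assistida | backend/src/modules/m16_risk_business_case.py | worst_risk_level
-- ===== SOURCE A (Python) =====
-- from enum import Enum
--
-- class RiskLevel(str, Enum):
--     """Nível de risco classificado."""
--
--     CRITICAL = "critical"
--     HIGH = "high"
--     MEDIUM = "medium"
--     LOW = "low"
--     NEGLIGIBLE = "negligible"
--
-- def worst_risk_level(levels: list[RiskLevel]) -> RiskLevel:
--     """Retorna o pior (mais severo) nível de risco de uma lista.
--
--     Args:
--         levels: Lista de níveis de risco.
--
--     Returns:
--         O nível mais severo encontrado.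
--     """
--     severity_order = [
--         RiskLevel.CRITICAL,
--         RiskLevel.HIGH,
--         RiskLevel.MEDIUM,
--         RiskLevel.LOW,
--         RiskLevel.NEGLIGIBLE,
--     ]
--     for level in severity_order:
--         if level in levels:
--             return level
--     return RiskLevel.MEDIUM
-- ===== SOURCE B (Python) =====
-- from enum import Enum
--
-- class RiskLevel(str, Enum):
--     """Nível de risco classificado."""
--
--     CRITICAL = "critical"
--     HIGH = "high"
--     MEDIUM = "medium"
--     LOW = "low"
--     NEGLIGIBLE = "negligible"
--
-- _SEVERITY = [
--     RiskLevel.CRITICAL,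
--     RiskLevel.HIGH,
--     RiskLevel.MEDIUM,
--     RiskLevel.LOW,
--     RiskLevel.NEGLIGIBLE,
-- ]
-- _RANK = {level: i for i, level in enumerate(_SEVERITY)}
--
-- def worst_risk_level(levels: list[RiskLevel]) -> RiskLevel:
--     """Single pass: keep the smallest severity rank seen; default MEDIUM."""
--     best = 5
--     for level in levels:
--         r = _RANK.get(level, 5)
--         if r < best:
--             best = r
--     return _SEVERITY[best] if best < 5 else RiskLevel.MEDIUM
-- ===== Notes on version B (the rewrite author's own statement) =====
-- stated objective: simpler
-- what changed: Replaces the five membership scans over the worst-to-best severity order with a single forward pass that keeps the minimum severity rank seen, mapping it back to a level (default MEDIUM when nothing ranked is present).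
import Mathlib
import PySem

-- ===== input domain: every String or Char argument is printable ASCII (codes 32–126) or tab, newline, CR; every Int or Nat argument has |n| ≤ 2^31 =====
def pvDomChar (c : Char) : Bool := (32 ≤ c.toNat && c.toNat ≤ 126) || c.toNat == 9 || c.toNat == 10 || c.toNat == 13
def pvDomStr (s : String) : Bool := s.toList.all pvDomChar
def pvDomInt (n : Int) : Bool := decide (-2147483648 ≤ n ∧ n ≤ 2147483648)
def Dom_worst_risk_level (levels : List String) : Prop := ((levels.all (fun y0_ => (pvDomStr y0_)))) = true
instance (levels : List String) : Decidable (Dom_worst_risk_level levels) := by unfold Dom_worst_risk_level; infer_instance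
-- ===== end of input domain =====

-- B is a structurally different rewrite (one pass keeping the minimum severity rank, instead of
-- five membership scans over the severity order); return values proved equal on all inputs.

-- ===== PORT A =====
-- the 'for level in severity_order: if level in levels: return level' loop
def pvWrlScan (order : List String) (levels : List String) : String :=
  match order with
  | [] => "medium"
  | l :: rest => if levels.contains l then l else pvWrlScan rest levels

def worst_risk_level (levels : List String) : String :=
  pvWrlScan ["critical", "high", "medium", "low", "negligible"] levels

-- ===== PORT B =====
def pvSeverity : List String := ["critical", "high", "medium", "low", "negligible"]

-- _RANK.get(level, 5)
def pvRank (s : String) : Nat :=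
  if s = "critical" then 0
  else if s = "high" then 1
  else if s = "medium" then 2
  else if s = "low" then 3
  else if s = "negligible" then 4
  else 5

def worst_risk_level_alt (levels : List String) : String :=
  let best := levels.foldl (fun best level =>
    let r := pvRank level
    if r < best then r else best) 5
  if best < 5 then pvSeverity.getD best "medium" else "medium"

-- ===== PRECONDITION & SPEC =====
def Spec_worst_risk_level (levels : List String) (out : String) : Prop := out = worst_risk_level_alt levels
instance (levels : List String) (out : String) : Decidable (Spec_worst_risk_level levels out) := by unfold Spec_worst_risk_level; infer_instance

-- ===== CLAIM (what is proved, stated in full; the proofs are below) =====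
def Claim_equal_worst_risk_level : Prop := ∀ (levels : List String), Dom_worst_risk_level levels → Spec_worst_risk_level levels (worst_risk_level levels)

-- ===== LEMMAS AND PROOFS =====

-- the minimum rank present in `levels` (5 if none), written as A's membership tests
def pvMinRank (levels : List String) : Nat :=
  if levels.contains "critical" then 0
  else if levels.contains "high" then 1
  else if levels.contains "medium" then 2
  else if levels.contains "low" then 3
  else if levels.contains "negligible" then 4
  else 5

theorem pvMinRank_le_five (levels : List String) : pvMinRank levels ≤ 5 := by
  unfold pvMinRank; split_ifs <;> omega

theorem pvMinRank_cons (s : String) (rest : List String) :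
    pvMinRank (s :: rest) = min (pvRank s) (pvMinRank rest) := by
  simp only [pvMinRank, pvRank, List.contains_cons, Bool.or_eq_true, beq_iff_eq]
  by_cases h0 : s = "critical" <;> by_cases h1 : s = "high" <;> by_cases h2 : s = "medium" <;>
    by_cases h3 : s = "low" <;> by_cases h4 : s = "negligible" <;>
    simp_all [eq_comm] <;> split_ifs <;> omega

theorem pvFold_eq_minRank (levels : List String) (b : Nat) (hb : b ≤ 5) :
    levels.foldl (fun best level =>
      let r := pvRank level
      if r < best then r else best) b = min b (pvMinRank levels) := by
  induction levels generalizing b with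
  | nil =>
    simp only [List.foldl_nil, pvMinRank, List.contains_nil]
    simp; omega
  | cons s rest ih =>
    simp only [List.foldl_cons, pvMinRank_cons]
    rw [ih _ (by unfold pvRank; split_ifs <;> omega)]
    unfold pvRank; split_ifs <;> omega

-- ===== VERDICT (by name: the statement is the Claim_ definition above) =====
theorem worst_risk_level_spec : Claim_equal_worst_risk_level := by
  intro levels _
  unfold Spec_worst_risk_level worst_risk_level worst_risk_level_alt
  rw [pvFold_eq_minRank levels 5 (le_refl 5)]
  have h5 := pvMinRank_le_five levels
  rw [min_eq_right h5]
  simp only [pvWrlScan, pvMinRank, pvSeverity]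
  split_ifs <;> first | rfl | omega
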